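-- pv_equiv track=rewrite | github.com/achieve0410/Algorithm | test9.py | makeChild
-- ===== SOURCE A (Python) =====
-- def makeChild(P):
--     Child = [0 for i in range(len(P))]
--
--     for i in range(len(P)):
--         if( i==0 ):
--             Child[i] = 0
--         else:
--             Child[i] = P[Child[i-1]]
--     return Child
-- ===== SOURCE B (Python) =====
-- def makeChild(P):
--     # Cycle detection: the orbit of 0 under cur -> P[cur] is eventually periodic,
--     # so detect the first repeated value and tile the cycle instead of stepping n times.
--     n = len(P)
--     seen = {}
--     orbit = []
--     cur = 0
--     for i in range(n):
--         if cur in seen: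
--             cycle = orbit[seen[cur]:]
--             q, r = divmod(n - i, len(cycle))
--             return orbit + cycle * q + cycle[:r]
--         seen[cur] = i
--         orbit.append(cur)
--         if i < n - 1:
--             cur = P[cur]
--     return orbit
-- ===== Notes on version B (the rewrite author's own statement) =====
-- stated objective: alternative
-- what changed: B replaces A's n sequential array reads by cycle detection: it records each pointer value's loop index in a dict, stops at the first repeated value, and builds the rest of the output by repeating the detected cycle (orbit + cycle*q + cycle[:r]) instead of stepping the recurrence to the end.
import Mathlib
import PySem

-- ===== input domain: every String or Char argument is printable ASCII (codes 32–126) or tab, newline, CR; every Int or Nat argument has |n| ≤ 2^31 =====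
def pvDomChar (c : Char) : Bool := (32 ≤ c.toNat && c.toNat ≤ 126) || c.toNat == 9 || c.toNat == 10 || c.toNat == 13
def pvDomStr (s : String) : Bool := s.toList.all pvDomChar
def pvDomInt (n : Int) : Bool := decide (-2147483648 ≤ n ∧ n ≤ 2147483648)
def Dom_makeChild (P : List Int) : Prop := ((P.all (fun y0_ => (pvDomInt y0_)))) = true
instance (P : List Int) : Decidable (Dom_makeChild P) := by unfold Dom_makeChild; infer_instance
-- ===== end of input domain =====

-- B replaces A's step-by-step recurrence by cycle detection: it records each pointer
-- value's first loop index in a dict, stops at the first repeat, and tiles the detected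
-- cycle to fill the rest of the output (objective: alternative algorithm, same cost).

-- ===== PORT A =====
def makeChild (P : List Int) : List Int :=
  let Child := (PySem.List.pyRange 0 (P.length : Int) 1).map (fun _ => (0 : Int))
  (PySem.List.pyRange 0 (P.length : Int) 1).foldl
    (fun Child i =>
      if i == 0 then
        PySem.List.pySetD Child i 0
      else
        PySem.List.pySetD Child i
          (PySem.List.pyGetD P (PySem.List.pyGetD Child (i - 1) 0) 0))
    Child

-- ===== PORT B =====
-- Source B's for-loop with its early return, as structural recursion on the remaining
-- iteration count f (i is the Python loop index, f + i = n throughout).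
-- seen's values are the loop indices i (Python ints ≥ 0), kept as Nat;
-- orbit[seen[cur]:] with 0 ≤ seen[cur] ≤ len(orbit) is exactly List.drop;
-- divmod of the two nonnegative ints n - i and len(cycle) is exactly Nat / and %;
-- 'cycle * q' is exactly (List.replicate q cycle).flatten and cycle[:r] is List.take.
def pvBLoop (P : List Int) (n : Nat) :
    Nat → Nat → PySem.Dict Int Nat → List Int → Int → List Int
  | 0, _, _, orbit, _ => orbit
  | f + 1, i, seen, orbit, cur =>
    match seen.get? cur with
    | some start =>
        let cycle := orbit.drop start
        let q := (n - i) / cycle.length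
        let r := (n - i) % cycle.length
        orbit ++ (List.replicate q cycle).flatten ++ cycle.take r
    | none =>
        let seen' := seen.insert cur i
        let orbit' := orbit ++ [cur]
        let cur' := if i < n - 1 then PySem.List.pyGetD P cur 0 else cur
        pvBLoop P n f (i + 1) seen' orbit' cur'

def makeChild_alt (P : List Int) : List Int :=
  pvBLoop P P.length P.length 0 PySem.Dict.empty [] 0

-- ===== PRECONDITION & SPEC =====
-- the pointer iterate: pvIter P cur m = m applications of cur ↦ P[cur]
def pvIter (P : List Int) (cur : Int) : Nat → Int
  | 0 => cur
  | m + 1 => pvIter P (PySem.List.pyGetD P cur 0) m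

-- Pre_ holds exactly when every index the pointer chase reads (the orbit of 0 under
-- cur ↦ P[cur], read n-1 times) is a valid, possibly negative, Python index into P;
-- outside it A raises IndexError.
def Pre_makeChild (P : List Int) : Prop :=
  ∀ k < P.length - 1, PySem.Raise.InRange P.length (pvIter P 0 k)
instance (P : List Int) : Decidable (Pre_makeChild P) := by unfold Pre_makeChild; infer_instance
def pvWitness_makeChild : List Int := [2, 0, 1]
def Spec_makeChild (P : List Int) (out : List Int) : Prop := out = makeChild_alt P
instance (P : List Int) (out : List Int) : Decidable (Spec_makeChild P out) := by unfold Spec_makeChild; infer_instance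

-- ===== CLAIM (what is proved, stated in full; the proofs are below) =====
def Claim_equal_makeChild : Prop := ∀ (P : List Int), Dom_makeChild P → Pre_makeChild P → Spec_makeChild P (makeChild P)

-- ===== LEMMAS AND PROOFS =====

-- the chain [cur, P[cur], P[P[cur]], …] of length m
def pvChain (P : List Int) (cur : Int) : Nat → List Int
  | 0 => []
  | m + 1 => cur :: pvChain P (PySem.List.pyGetD P cur 0) m

theorem pvChain_length (P : List Int) (cur : Int) (m : Nat) :
    (pvChain P cur m).length = m := by
  induction m generalizing cur with
  | zero => rfl
  | succ m ih => simp [pvChain, ih]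

theorem pvIter_succ_right (P : List Int) (cur : Int) (m : Nat) :
    pvIter P cur (m + 1) = PySem.List.pyGetD P (pvIter P cur m) 0 := by
  induction m generalizing cur with
  | zero => rfl
  | succ m ih => simpa [pvIter] using ih (PySem.List.pyGetD P cur 0)

theorem pvIter_add (P : List Int) (cur : Int) (a b : Nat) :
    pvIter P cur (a + b) = pvIter P (pvIter P cur a) b := by
  induction a generalizing cur with
  | zero => simp [pvIter]
  | succ a ih =>
    have : a + 1 + b = (a + b) + 1 := by omega
    rw [this]
    simpa [pvIter] using ih (PySem.List.pyGetD P cur 0)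

theorem pvChain_succ_right (P : List Int) (cur : Int) (m : Nat) :
    pvChain P cur (m + 1) = pvChain P cur m ++ [pvIter P cur m] := by
  induction m generalizing cur with
  | zero => rfl
  | succ m ih => simpa [pvChain, pvIter] using ih (PySem.List.pyGetD P cur 0)

theorem pvChain_add (P : List Int) (cur : Int) (a b : Nat) :
    pvChain P cur (a + b) = pvChain P cur a ++ pvChain P (pvIter P cur a) b := by
  induction a generalizing cur with
  | zero => simp [pvChain, pvIter]
  | succ a ih =>
    have : a + 1 + b = (a + b) + 1 := by omega
    rw [this]
    simpa [pvChain, pvIter] using ih (PySem.List.pyGetD P cur 0)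

theorem pvChain_take (P : List Int) (cur : Int) (r m : Nat) (h : r ≤ m) :
    (pvChain P cur m).take r = pvChain P cur r := by
  induction r generalizing cur m with
  | zero => simp [pvChain]
  | succ r ih =>
    cases m with
    | zero => omega
    | succ m =>
      simp [pvChain, ih (PySem.List.pyGetD P cur 0) m (by omega)]

-- tiling: a periodic chain of length q*L + r is q copies of the cycle plus a prefix
theorem pvTile (P : List Int) (x : Int) (L : Nat) (hx : pvIter P x L = x) (q r : Nat) :
    pvChain P x (q * L + r)
      = (List.replicate q (pvChain P x L)).flatten ++ pvChain P x r := by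
  induction q with
  | zero => simp
  | succ q ih =>
    have : (q + 1) * L + r = L + (q * L + r) := by ring
    rw [this, pvChain_add, hx, ih, List.replicate_succ]
    simp

theorem pvSet_append (l1 l2 : List Int) (x v : Int) (n : Nat) (h : n = l1.length) :
    (l1 ++ x :: l2).set n v = l1 ++ v :: l2 := by
  subst h
  induction l1 with
  | nil => rfl
  | cons a l1 ih => simp [ih]

theorem pvChain_getD (P : List Int) (cur : Int) (m p : Nat) (hp : p < m) :
    (pvChain P cur m).getD p 0 = pvIter P cur p := by
  induction p generalizing cur m with
  | zero =>
    cases m with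
    | zero => omega
    | succ m => rfl
  | succ p ih =>
    cases m with
    | zero => omega
    | succ m =>
      simpa [pvChain, pvIter] using ih (PySem.List.pyGetD P cur 0) m (by omega)

-- A's loop, run up to k, yields the chain followed by the untouched zeros
theorem pvA_loop (P : List Int) (k : Nat) (hk : k ≤ P.length) :
    (PySem.List.pyRange 0 (k : Int) 1).foldl
      (fun Child i =>
        if i == 0 then
          PySem.List.pySetD Child i 0
        else
          PySem.List.pySetD Child i
            (PySem.List.pyGetD P (PySem.List.pyGetD Child (i - 1) 0) 0))
      (List.replicate P.length (0 : Int))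
      = pvChain P 0 k ++ List.replicate (P.length - k) 0 := by
  induction k with
  | zero => simp [pvChain]
  | succ k ih =>
    have hsplit : PySem.List.pyRange 0 ((k : Int) + 1) 1
        = PySem.List.pyRange 0 (k : Int) 1 ++ [(k : Int)] :=
      PySem.List.pyRange_one_succ_right (by positivity)
    have hcast : ((k + 1 : Nat) : Int) = (k : Int) + 1 := by push_cast; ring
    rw [hcast, hsplit, List.foldl_append, ih (by omega)]
    have hrep : P.length - k = (P.length - (k + 1)) + 1 := by omega
    cases k with
    | zero =>
      simp only [List.foldl_cons, List.foldl_nil, pvChain, List.nil_append]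
      norm_num
      rw [show (0 : Int) = ((0 : Nat) : Int) from rfl, PySem.List.pySetD_natCast]
      obtain ⟨m, hm⟩ : ∃ m, P.length = m + 1 := ⟨P.length - 1, by omega⟩
      rw [hm]
      simp [List.replicate_succ]
    | succ j =>
      simp only [List.foldl_cons, List.foldl_nil]
      have hne : (((j + 1 : Nat) : Int) == 0) = false := by
        simp only [beq_eq_false_iff_ne, ne_eq]
        push_cast
        omega
      rw [hne]
      simp only [Bool.false_eq_true, if_false]
      have hread1 : ((j + 1 : Nat) : Int) - 1 = ((j : Nat) : Int) := by push_cast; ring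
      rw [hread1, PySem.List.pyGetD_natCast]
      have hgetD : (pvChain P 0 (j + 1) ++ List.replicate (P.length - (j + 1)) 0).getD j 0
          = pvIter P 0 j := by
        rw [List.getD_eq_getElem?_getD, List.getElem?_append_left
          (by rw [pvChain_length]; omega)]
        rw [← List.getD_eq_getElem?_getD, pvChain_getD P 0 (j + 1) j (by omega)]
      rw [hgetD, PySem.List.pySetD_natCast]
      rw [hrep, List.replicate_succ]
      rw [pvSet_append _ _ _ _ _ (pvChain_length P 0 (j + 1)).symm]
      rw [pvChain_succ_right P 0 (j + 1), pvIter_succ_right]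
      simp

theorem pvZeros (P : List Int) :
    (PySem.List.pyRange 0 (P.length : Int) 1).map (fun _ => (0 : Int))
      = List.replicate P.length (0 : Int) := by
  rw [List.eq_replicate_iff]
  constructor
  · simp [PySem.List.length_pyRange_one]
  · intro b hb
    simp only [List.mem_map] at hb
    obtain ⟨x, _, hx⟩ := hb
    exact hx.symm

theorem pvA_eq_chain (P : List Int) : makeChild P = pvChain P 0 P.length := by
  unfold makeChild
  rw [pvZeros, pvA_loop P P.length (le_refl _)]
  simp

-- B's loop invariant: orbit is the chain so far, cur the current iterate, and every
-- seen entry (v, j) records a true occurrence pvIter P 0 j = v with j < i.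
theorem pvB_loop (P : List Int) (n : Nat) (f : Nat) :
    ∀ (i : Nat) (seen : PySem.Dict Int Nat) (orbit : List Int) (cur : Int),
      f + i = n →
      orbit = pvChain P 0 i →
      (0 < f → cur = pvIter P 0 i) →
      (∀ v j, seen.get? v = some j → pvIter P 0 j = v ∧ j < i) →
      pvBLoop P n f i seen orbit cur = pvChain P 0 n := by
  induction f with
  | zero =>
    intro i seen orbit cur hfi horbit _ _
    have : i = n := by omega
    simp [pvBLoop, horbit, this]
  | succ f ih =>
    intro i seen orbit cur hfi horbit hcur hseen
    have hcur' : cur = pvIter P 0 i := hcur (by omega)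
    have hin : i < n := by omega
    rw [pvBLoop]
    cases hget : seen.get? cur with
    | some start =>
      obtain ⟨hst, hlt⟩ := hseen cur start hget
      subst horbit
      -- cycle = the chain segment from start to i; its length L = i - start > 0
      set L := i - start with hLdef
      have hL : 0 < L := by omega
      have hiL : i = start + L := by omega
      have hdrop : (pvChain P 0 i).drop start = pvChain P (pvIter P 0 start) L := by
        rw [hiL, pvChain_add]
        have hlen : (pvChain P 0 start).length = start := pvChain_length P 0 start
        rw [List.drop_append_of_le_length (by omega)]
        simp [hlen]
      -- the pointer returns to pvIter start after L steps
      have hper : pvIter P (pvIter P 0 start) L = pvIter P 0 start := by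
        rw [← pvIter_add, ← hiL, ← hcur', hst]
      -- chain 0 n splits at i, and the tail starts at cur = pvIter start
      have hsplitn : pvChain P 0 n = pvChain P 0 i ++ pvChain P (pvIter P 0 start) (n - i) := by
        have : n = i + (n - i) := by omega
        rw [this, pvChain_add, ← hcur', hst, hcur']
        congr 2
        omega
      have hr : (n - i) % L ≤ L := le_of_lt (Nat.mod_lt _ hL)
      have ht := pvTile P (pvIter P 0 start) L hper ((n - i) / L) ((n - i) % L)
      have hkey : pvChain P (pvIter P 0 start) (n - i)
          = (List.replicate ((n - i) / L) (pvChain P (pvIter P 0 start) L)).flatten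
            ++ (pvChain P (pvIter P 0 start) L).take ((n - i) % L) := by
        rw [pvChain_take P _ _ L hr, ← ht]
        congr 1
        rw [Nat.mul_comm]
        exact (Nat.div_add_mod _ _).symm
      simp only [hdrop, pvChain_length, List.append_assoc]
      rw [hsplitn, ← hkey]
    | none =>
      apply ih (i + 1)
      · omega
      · rw [horbit, hcur', ← pvChain_succ_right]
      · intro hf
        have : i < n - 1 := by omega
        simp only [if_pos this, hcur', ← pvIter_succ_right]
      · intro v j hj
        rw [PySem.Dict.get?_insert] at hj
        by_cases hv : v = cur
        · subst hv
          rw [if_pos rfl] at hj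
          cases hj
          exact ⟨hcur'.symm, by omega⟩
        · rw [if_neg hv] at hj
          obtain ⟨h1, h2⟩ := hseen v j hj
          exact ⟨h1, by omega⟩

theorem pvB_eq_chain (P : List Int) : makeChild_alt P = pvChain P 0 P.length := by
  unfold makeChild_alt
  apply pvB_loop P P.length P.length 0 PySem.Dict.empty [] 0 (by omega) rfl
    (fun _ => rfl)
  intro v j hj
  rw [PySem.Dict.get?_empty] at hj
  exact absurd hj (by simp)

-- ===== VERDICT (by name: the statement is the Claim_ definition above) =====
theorem makeChild_spec : Claim_equal_makeChild := by
  intro P _ _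
  unfold Spec_makeChild
  rw [pvA_eq_chain, pvB_eq_chain]
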